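-- pv_equiv track=rewrite | github.com/ekazakos/grove | dataset/video_grounding_datasets/ActivityNetEntities.py | _find_first_occurrences
-- ===== SOURCE A (Python) =====
-- def _find_first_occurrences(caption, labels):
--     """
--     Find the first occurrence of each label in the caption, allowing for partial matches (e.g., "apple" matches "apples").
--     """
--     tokens_positive = []
--     used_labels = set()  # To track labels that have already been tagged
--
--     # Tokenize the caption to match against words
--     words = caption.split()
--
--     for label in labels:
--         if label in used_labels:
--             continue
--
--         # Check each word in the caption for a match with the label
--         for _, word in enumerate(words):
--             if label in word:  # Check if the label is a substring of the word
--                 # Find the character-level start and end positions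
--                 start = caption.find(word)
--                 end = start + len(word)
--                 tokens_positive.append((start, end))
--                 used_labels.add(label)  # Mark this label as used
--                 break  # Move to the next label after the first match
--
--     return tokens_positive
-- ===== SOURCE B (Python) =====
-- def _find_first_occurrences(caption, labels):
--     """One forward pass over the words with a shrinking pending list of unique
--     labels; record (label_index, span) on first match, then sort by label index."""
--     words = caption.split()
--     pending = list(enumerate(dict.fromkeys(labels)))
--     found = []
--     for word in words:
--         still = []
--         for idx, lab in pending:
--             if lab in word:
--                 start = caption.find(word)
--                 found.append((idx, (start, start + len(word))))
--             else:
--                 still.append((idx, lab))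
--         pending = still
--     found.sort(key=lambda t: t[0])
--     return [span for _, span in found]
-- ===== Notes on version B (the rewrite author's own statement) =====
-- stated objective: alternative
-- what changed: A scans the word list once per label with a used-set; B deduplicates the labels once, makes a single forward pass over the words against a shrinking pending list, records (label_index, span) on first match, and sorts the hits by label index at the end.
import Mathlib
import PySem

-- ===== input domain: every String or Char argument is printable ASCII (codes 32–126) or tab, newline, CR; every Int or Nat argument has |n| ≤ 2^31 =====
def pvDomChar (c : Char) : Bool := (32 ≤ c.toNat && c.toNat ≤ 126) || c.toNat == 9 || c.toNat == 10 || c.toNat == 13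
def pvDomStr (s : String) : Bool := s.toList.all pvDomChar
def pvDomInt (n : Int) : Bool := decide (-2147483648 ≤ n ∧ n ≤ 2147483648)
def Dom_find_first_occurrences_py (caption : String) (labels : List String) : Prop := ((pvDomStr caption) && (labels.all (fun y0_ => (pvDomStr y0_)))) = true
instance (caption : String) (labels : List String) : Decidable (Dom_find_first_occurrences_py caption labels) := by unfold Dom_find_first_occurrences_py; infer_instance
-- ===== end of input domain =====

-- B replaces A's word-scan-per-label with a single forward pass over the words against a
-- shrinking pending list of deduplicated labels, sorting the hits by label index at the end
-- (objective: alternative — a different traversal of the same data, same exact result).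

-- ===== PORT A =====
-- outer 'for label in labels' loop of A (continue on used labels; the inner
-- 'for word … break' is "first word containing the label", i.e. find?)
def ffoLoopA (caption : String) (words : List String) :
    List String → List (Int × Int) → PySem.Set String → List (Int × Int)
  | [], tp, _ => tp
  | l :: rest, tp, used =>
    if PySem.Set.contains used l then ffoLoopA caption words rest tp used
    else
      match words.find? (fun w => PySem.Str.isIn l w) with
      | some w =>
          let start := PySem.Str.find caption w
          ffoLoopA caption words rest (tp ++ [(start, start + PySem.Str.len w)])
            (PySem.Set.add used l)
      | none => ffoLoopA caption words rest tp used

def find_first_occurrences_py (caption : String) (labels : List String) : List (Int × Int) :=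
  ffoLoopA caption (PySem.Str.split₀ caption) labels [] PySem.Set.empty

-- ===== PORT B =====
def find_first_occurrences_py_alt (caption : String) (labels : List String) : List (Int × Int) :=
  let words := PySem.Str.split₀ caption
  let pending0 : List (Int × String) := PySem.List.enumerate (PySem.List.dedup labels)
  let st :=
    words.foldl
      (fun (st : List (Int × String) × List (Int × (Int × Int))) word =>
        st.1.foldl
          (fun (st2 : List (Int × String) × List (Int × (Int × Int))) p =>
            if PySem.Str.isIn p.2 word then
              let start := PySem.Str.find caption word
              (st2.1, st2.2 ++ [(p.1, (start, start + PySem.Str.len word))])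
            else (st2.1 ++ [p], st2.2))
          ([], st.2))
      (pending0, [])
  (PySem.List.sorted st.2 (fun t => t.1) false).map (·.2)

-- ===== PRECONDITION & SPEC =====
def Spec_find_first_occurrences_py (caption : String) (labels : List String) (out : List (Int × Int)) : Prop := out = find_first_occurrences_py_alt caption labels
instance (caption : String) (labels : List String) (out : List (Int × Int)) : Decidable (Spec_find_first_occurrences_py caption labels out) := by unfold Spec_find_first_occurrences_py; infer_instance

-- ===== CLAIM (what is proved, stated in full; the proofs are below) =====
def Claim_equal_find_first_occurrences_py : Prop := ∀ (caption : String) (labels : List String), Dom_find_first_occurrences_py caption labels → Spec_find_first_occurrences_py caption labels (find_first_occurrences_py caption labels)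

-- ===== LEMMAS AND PROOFS =====

lemma foldl_add_eq_append_filter (xs : List String) (s : PySem.Set String) :
    xs.foldl PySem.Set.add s
      = s ++ (PySem.List.dedup xs).filter (fun y => !PySem.Set.contains s y) := by
  induction xs generalizing s with
  | nil => simp
  | cons x xs ih =>
    have hded : PySem.List.dedup (x :: xs) = List.foldl PySem.Set.add (PySem.Set.add [] x) xs := rfl
    rw [hded, ih (PySem.Set.add [] x)]
    simp only [List.foldl_cons]
    rw [ih (PySem.Set.add s x)]
    simp only [PySem.Set.add, PySem.Set.contains, List.contains_nil, Bool.false_eq_true,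
      if_false, List.nil_append]
    by_cases hcx : List.contains s x = true
    · have hx : x ∈ s := by simpa using hcx
      rw [if_pos hcx]
      simp
      rw [List.filter_cons_of_neg (by simp [hx]), List.filter_filter]
      apply List.filter_congr
      intro y _
      by_cases hyx : y = x
      · subst hyx; simp [hx]
      · simp [hyx]
    · have hx : x ∉ s := by simpa using hcx
      rw [if_neg hcx]
      simp [List.append_assoc]
      rw [List.filter_cons_of_pos (by simp [hx])]
      congr 1
      rw [List.filter_filter]

lemma dedup_cons (x : String) (xs : List String) :
    PySem.List.dedup (x :: xs) = x :: (PySem.List.dedup xs).filter (fun y => !decide (y = x)) := by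
  have h : PySem.List.dedup (x :: xs) = List.foldl PySem.Set.add (PySem.Set.add [] x) xs := rfl
  rw [h, foldl_add_eq_append_filter]
  simp [PySem.Set.add, PySem.Set.contains]

def ffoSpan (caption w : String) : Int × Int :=
  (PySem.Str.find caption w, PySem.Str.find caption w + PySem.Str.len w)

def ffoFirst (words : List String) (l : String) : Option String :=
  words.find? (fun w => PySem.Str.isIn l w)

def ffoF (caption : String) (words : List String) (ls : List String) : List (Int × Int) :=
  ls.filterMap (fun l => (ffoFirst words l).map (ffoSpan caption))

lemma ffoF_cons_none (caption : String) (words : List String) (l : String) (ls : List String)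
    (h : ffoFirst words l = none) :
    ffoF caption words (l :: ls) = ffoF caption words ls := by
  unfold ffoF
  rw [List.filterMap_cons_none (by simp [h])]

lemma ffoF_cons_some (caption : String) (words : List String) (l w : String) (ls : List String)
    (h : ffoFirst words l = some w) :
    ffoF caption words (l :: ls) = ffoSpan caption w :: ffoF caption words ls := by
  unfold ffoF
  rw [List.filterMap_cons_some (b := ffoSpan caption w) (by simp [h])]

lemma filterMap_filter_ne_of_none {α β : Type} [DecidableEq α] (h : α → Option β)
    (l : α) (hl : h l = none) (p : α → Bool) (ds : List α) :
    (ds.filter (fun y => !decide (y = l) && p y)).filterMap h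
      = (ds.filter p).filterMap h := by
  induction ds with
  | nil => rfl
  | cons y ds ih =>
    by_cases hyl : y = l
    · subst hyl
      simp only [List.filter_cons, decide_true, Bool.not_true, Bool.false_and]
      rw [if_neg (by simp)]
      by_cases hp : p y = true
      · rw [if_pos hp, List.filterMap_cons, hl, ih]
      · rw [if_neg hp, ih]
    · simp only [List.filter_cons, hyl, decide_false, Bool.not_false,
        Bool.true_and]
      by_cases hp : p y = true
      · rw [if_pos hp, if_pos hp, List.filterMap_cons, List.filterMap_cons, ih]
      · rw [if_neg hp, if_neg hp, ih]

lemma ffoLoopA_eq (caption : String) (words : List String) (ls : List String)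
    (tp : List (Int × Int)) (u : PySem.Set String) :
    ffoLoopA caption words ls tp u
      = tp ++ ffoF caption words
          ((PySem.List.dedup ls).filter (fun l => !PySem.Set.contains u l)) := by
  induction ls generalizing tp u with
  | nil => simp [ffoLoopA, ffoF]
  | cons l rest ih =>
    rw [dedup_cons]
    by_cases hc : PySem.Set.contains u l = true
    · have hm : l ∈ u := by simpa using hc
      rw [ffoLoopA, if_pos hc, ih]
      congr 2
      rw [List.filter_cons_of_neg (by simp [hm]), List.filter_filter]
      apply List.filter_congr
      intro y _
      by_cases hyl : y = l
      · subst hyl; simp [hm]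
      · simp [hyl]
    · have hm : l ∉ u := by simpa using hc
      rw [ffoLoopA, if_neg hc]
      rw [List.filter_cons_of_pos (by simp [hm])]
      rw [show List.find? (fun w => PySem.Str.isIn l w) words = ffoFirst words l from rfl]
      cases hf : ffoFirst words l with
      | some w =>
        rw [ffoF_cons_some caption words l w _ hf]
        show ffoLoopA caption words rest
            (tp ++ [(PySem.Str.find caption w, PySem.Str.find caption w + PySem.Str.len w)])
            (PySem.Set.add u l) = _
        rw [ih, List.append_assoc]
        congr 1
        simp only [List.singleton_append]
        congr 1
        rw [List.filter_filter]
        congr 1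
        apply List.filter_congr
        intro y _
        by_cases hyl : y = l
        · subst hyl; simp [PySem.Set.add, PySem.Set.contains, hm]
        · simp [hyl, hm, PySem.Set.add, PySem.Set.contains, Bool.and_comm]
      | none =>
        rw [ffoF_cons_none caption words l _ hf]
        show ffoLoopA caption words rest tp u = _
        rw [ih]
        congr 1
        rw [List.filter_filter,
          show (fun a => !PySem.Set.contains u a && !decide (a = l))
              = (fun a => !decide (a = l) && !PySem.Set.contains u a) from
            funext (fun a => Bool.and_comm _ _)]
        refine (filterMap_filter_ne_of_none _ l ?_ _ _).symm
        simp [ffoFirst] at hf ⊢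
        exact hf

lemma filterMap_perm_split {α β : Type} (c : α → Bool) (m : α → β) (r : α → Option β)
    (P : List α) :
    (P.filterMap (fun p => if c p then some (m p) else r p)).Perm
      ((P.filter c).map m ++ (P.filter (fun p => !c p)).filterMap r) := by
  induction P with
  | nil => simp
  | cons p P ih =>
    by_cases hc : c p = true
    · rw [List.filterMap_cons_some (b := m p) (by simp [hc]), List.filter_cons_of_pos hc,
        List.filter_cons_of_neg (by simp [hc]), List.map_cons, List.cons_append]
      exact ih.cons _
    · rw [List.filter_cons_of_neg hc, List.filter_cons_of_pos (by simp [hc])]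
      cases hr : r p with
      | some b =>
        rw [List.filterMap_cons_some (b := b) (by simp [hc, hr]), List.filterMap_cons_some hr]
        exact (ih.cons b).trans List.perm_middle.symm
      | none =>
        rw [List.filterMap_cons_none (by simp [hc, hr]), List.filterMap_cons_none hr]
        exact ih

lemma ffoInner_eq (caption word : String) (P : List (Int × String))
    (S : List (Int × String)) (acc : List (Int × (Int × Int))) :
    P.foldl
      (fun (st2 : List (Int × String) × List (Int × (Int × Int))) p =>
        if PySem.Str.isIn p.2 word then
          let start := PySem.Str.find caption word
          (st2.1, st2.2 ++ [(p.1, (start, start + PySem.Str.len word))])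
        else (st2.1 ++ [p], st2.2)) (S, acc)
      = (S ++ P.filter (fun p => !PySem.Str.isIn p.2 word),
         acc ++ (P.filter (fun p => PySem.Str.isIn p.2 word)).map
            (fun p => (p.1, ffoSpan caption word))) := by
  induction P generalizing S acc with
  | nil => simp
  | cons p P ih =>
    by_cases hc : PySem.Str.isIn p.2 word = true
    · rw [List.foldl_cons, if_pos hc, ih]
      simp at hc
      simp [hc, ffoSpan, List.append_assoc]
    · rw [List.foldl_cons, if_neg hc, ih]
      simp at hc
      simp [hc, List.append_assoc]

lemma ffoOuter_perm (caption : String) (words : List String)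
    (P : List (Int × String)) (acc : List (Int × (Int × Int))) :
    (words.foldl
      (fun (st : List (Int × String) × List (Int × (Int × Int))) word =>
        st.1.foldl
          (fun (st2 : List (Int × String) × List (Int × (Int × Int))) p =>
            if PySem.Str.isIn p.2 word then
              let start := PySem.Str.find caption word
              (st2.1, st2.2 ++ [(p.1, (start, start + PySem.Str.len word))])
            else (st2.1 ++ [p], st2.2))
          ([], st.2))
      (P, acc)).2.Perm
      (acc ++ P.filterMap (fun p => (ffoFirst words p.2).map (fun w => (p.1, ffoSpan caption w)))) := by
  induction words generalizing P acc with
  | nil => simp [ffoFirst]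
  | cons word rest ih =>
    rw [List.foldl_cons, ffoInner_eq]
    simp only [List.nil_append]
    refine (ih _ _).trans ?_
    rw [List.append_assoc]
    refine (List.Perm.append_left acc ?_)
    have hsplit := filterMap_perm_split (fun p => PySem.Str.isIn p.2 word)
      (fun p => (p.1, ffoSpan caption word))
      (fun p => (ffoFirst rest p.2).map (fun w => (p.1, ffoSpan caption w))) P
    refine List.Perm.trans hsplit.symm ?_
    have hfun : (fun p : Int × String => (ffoFirst (word :: rest) p.2).map (fun w => (p.1, ffoSpan caption w)))
        = (fun p => if PySem.Str.isIn p.2 word then some (p.1, ffoSpan caption word)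
            else (ffoFirst rest p.2).map (fun w => (p.1, ffoSpan caption w))) := by
      funext p
      by_cases hc : PySem.Str.isIn p.2 word = true
      · rw [if_pos hc]
        simp only [PySem.Str.isIn_eq] at hc
        simp [ffoFirst, hc, ffoSpan]
      · rw [if_neg hc]
        simp only [PySem.Str.isIn_eq] at hc
        simp at hc
        simp [ffoFirst, hc]
    rw [hfun]

lemma enumerate_pairwise_fst_lt (xs : List String) (s : Int) :
    (PySem.List.enumerate xs s).Pairwise (fun a b => a.1 < b.1) := by
  have h := PySem.List.map_fst_enumerate xs s
  have hp : ((PySem.List.enumerate xs s).map (·.1)).Pairwise (· < ·) := by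
    rw [h]; exact PySem.List.pairwise_lt_pyRange_one _ _
  exact (List.pairwise_map.mp hp)

lemma T_pairwise (caption : String) (words : List String) (xs : List String) (s : Int) :
    ((PySem.List.enumerate xs s).filterMap
        (fun p => (ffoFirst words p.2).map (fun w => (p.1, ffoSpan caption w)))).Pairwise
      (fun a b => a.1 < b.1) := by
  refine List.Pairwise.filterMap _ ?_ (enumerate_pairwise_fst_lt xs s)
  intro a b hab x hx y hy
  cases ha : ffoFirst words a.2 with
  | none => simp [ha] at hx
  | some w =>
    cases hb : ffoFirst words b.2 with
    | none => simp [hb] at hy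
    | some v =>
      simp [ha] at hx
      simp [hb] at hy
      subst hx; subst hy
      exact hab

lemma T_map_snd (caption : String) (words : List String) (xs : List String) (s : Int) :
    ((PySem.List.enumerate xs s).filterMap
        (fun p => (ffoFirst words p.2).map (fun w => (p.1, ffoSpan caption w)))).map (·.2)
      = ffoF caption words xs := by
  induction xs generalizing s with
  | nil => rfl
  | cons l ls ih =>
    rw [PySem.List.enumerate_cons]
    cases hf : ffoFirst words l with
    | none =>
      rw [List.filterMap_cons_none (by simp [hf]), ffoF_cons_none _ _ _ _ hf, ih]
    | some w =>
      rw [List.filterMap_cons_some (b := (s, ffoSpan caption w)) (by simp [hf]),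
        ffoF_cons_some _ _ _ _ _ hf, List.map_cons, ih]

lemma main_eq (caption : String) (labels : List String) :
    find_first_occurrences_py caption labels = find_first_occurrences_py_alt caption labels := by
  unfold find_first_occurrences_py find_first_occurrences_py_alt
  set words := PySem.Str.split₀ caption with hw
  have hA : ffoLoopA caption words labels [] PySem.Set.empty
      = ffoF caption words (PySem.List.dedup labels) := by
    rw [ffoLoopA_eq]
    simp [PySem.Set.empty, PySem.Set.contains]
  rw [hA]
  have hperm := ffoOuter_perm caption words (PySem.List.enumerate (PySem.List.dedup labels)) []
  rw [List.nil_append] at hperm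
  have hsorted := PySem.List.sorted_eq_of_perm_of_pairwise_lt _ _ (fun t : Int × (Int × Int) => t.1)
    hperm.symm (T_pairwise caption words (PySem.List.dedup labels) 0)
  show ffoF caption words (PySem.List.dedup labels)
      = (PySem.List.sorted
          (List.foldl
            (fun (st : List (Int × String) × List (Int × (Int × Int))) word =>
              st.1.foldl
                (fun (st2 : List (Int × String) × List (Int × (Int × Int))) p =>
                  if PySem.Str.isIn p.2 word then
                    let start := PySem.Str.find caption word
                    (st2.1, st2.2 ++ [(p.1, (start, start + PySem.Str.len word))])
                  else (st2.1 ++ [p], st2.2))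
                ([], st.2))
            (PySem.List.enumerate (PySem.List.dedup labels), []) words).2
          (fun t => t.1) false).map (·.2)
  rw [hsorted, T_map_snd]

-- ===== VERDICT (by name: the statement is the Claim_ definition above) =====
theorem find_first_occurrences_py_spec : Claim_equal_find_first_occurrences_py := by
  intro caption labels _
  unfold Spec_find_first_occurrences_py
  exact main_eq caption labels
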